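-- pv_equiv track=rewrite | github.com/Chrstxxan/Suggest-AI | src/chatbot.py | reforcar_por_genero
-- ===== SOURCE A (Python) =====
-- def reforcar_por_genero(recomendacoes, gostos, movies_map, top_n=5):
--     compativeis = [f for f in recomendacoes if movies_map.get(f) in gostos]
--     if len(compativeis) >= 3:
--         return compativeis[:top_n]
--     elif compativeis:
--         restantes = [f for f in recomendacoes if f not in compativeis]
--         return (compativeis + restantes)[:top_n]
--     return recomendacoes[:top_n]
-- ===== SOURCE B (Python) =====
-- def reforcar_por_genero(recomendacoes, gostos, movies_map, top_n=5):
--     compativeis, restantes = [], []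
--     for f in recomendacoes:
--         (compativeis if movies_map.get(f) in gostos else restantes).append(f)
--     if len(compativeis) >= 3:
--         return compativeis[:top_n]
--     return (compativeis + restantes)[:top_n]
-- ===== Notes on version B (the rewrite author's own statement) =====
-- stated objective: simpler
-- what changed: Replaces A's two list comprehensions (the second with an O(n^2) 'f not in compativeis' scan) and three-branch return by a single-pass partition of recomendacoes into matches and non-matches followed by just two return cases; this is exact because the partition criterion depends only on the element, so 'not in compativeis' equals 'no genre match', and when there are no matches compativeis+restantes equals recomendacoes.
import Mathlib
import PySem

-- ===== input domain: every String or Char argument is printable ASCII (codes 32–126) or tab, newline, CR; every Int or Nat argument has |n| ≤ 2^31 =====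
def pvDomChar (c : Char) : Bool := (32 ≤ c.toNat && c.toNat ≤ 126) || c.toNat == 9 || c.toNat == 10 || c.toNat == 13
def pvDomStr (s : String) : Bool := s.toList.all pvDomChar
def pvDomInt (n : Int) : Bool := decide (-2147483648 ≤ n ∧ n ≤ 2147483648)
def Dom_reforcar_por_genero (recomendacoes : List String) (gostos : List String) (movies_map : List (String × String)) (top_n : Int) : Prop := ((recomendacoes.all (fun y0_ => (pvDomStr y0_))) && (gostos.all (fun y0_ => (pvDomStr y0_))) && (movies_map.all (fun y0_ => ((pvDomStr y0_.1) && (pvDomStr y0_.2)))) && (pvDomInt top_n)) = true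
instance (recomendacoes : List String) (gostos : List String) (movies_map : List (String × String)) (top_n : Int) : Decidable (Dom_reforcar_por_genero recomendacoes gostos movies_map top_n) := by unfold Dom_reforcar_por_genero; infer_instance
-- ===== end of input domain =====

-- B replaces A's two comprehensions (with a quadratic 'not in' scan) by one partition pass and two return cases; objective: simpler.


-- shared helper: 'movies_map.get(f) in gostos' (None is never in a list of strings)
def pvGet (movies_map : List (String × String)) (f : String) : Option String :=
  match movies_map with
  | [] => none
  | (k, v) :: rest => if k == f then some v else pvGet rest f

def pvMatch (movies_map : List (String × String)) (gostos : List String) (f : String) : Bool :=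
  match pvGet movies_map f with
  | some g => gostos.contains g
  | none => false

-- ===== PORT A =====
def reforcar_por_genero (recomendacoes : List String) (gostos : List String) (movies_map : List (String × String)) (top_n : Int) : List String :=
  let compativeis := recomendacoes.filter (fun f => pvMatch movies_map gostos f)
  if compativeis.length ≥ 3 then
    PySem.List.slice compativeis none (some top_n)
  else if !compativeis.isEmpty then
    let restantes := recomendacoes.filter (fun f => !compativeis.contains f)
    PySem.List.slice (compativeis ++ restantes) none (some top_n)
  else
    PySem.List.slice recomendacoes none (some top_n)

-- ===== PORT B =====
-- the single loop of Source B: partition recomendacoes into (matches, non-matches), order preserved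
def pvPartition (movies_map : List (String × String)) (gostos : List String) : List String → List String × List String
  | [] => ([], [])
  | f :: fs =>
    let p := pvPartition movies_map gostos fs
    if pvMatch movies_map gostos f then (f :: p.1, p.2) else (p.1, f :: p.2)

def reforcar_por_genero_alt (recomendacoes : List String) (gostos : List String) (movies_map : List (String × String)) (top_n : Int) : List String :=
  let p := pvPartition movies_map gostos recomendacoes
  if p.1.length ≥ 3 then
    PySem.List.slice p.1 none (some top_n)
  else
    PySem.List.slice (p.1 ++ p.2) none (some top_n)

-- ===== PRECONDITION & SPEC =====
def Spec_reforcar_por_genero (recomendacoes : List String) (gostos : List String) (movies_map : List (String × String)) (top_n : Int) (out : List String) : Prop := out = reforcar_por_genero_alt recomendacoes gostos movies_map top_n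
instance (recomendacoes : List String) (gostos : List String) (movies_map : List (String × String)) (top_n : Int) (out : List String) : Decidable (Spec_reforcar_por_genero recomendacoes gostos movies_map top_n out) := by unfold Spec_reforcar_por_genero; infer_instance

-- ===== CLAIM (what is proved, stated in full; the proofs are below) =====
def Claim_equal_reforcar_por_genero : Prop := ∀ (recomendacoes : List String) (gostos : List String) (movies_map : List (String × String)) (top_n : Int), Dom_reforcar_por_genero recomendacoes gostos movies_map top_n → Spec_reforcar_por_genero recomendacoes gostos movies_map top_n (reforcar_por_genero recomendacoes gostos movies_map top_n)

-- ===== LEMMAS AND PROOFS =====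

theorem pvPartition_fst (movies_map : List (String × String)) (gostos : List String) (xs : List String) :
    (pvPartition movies_map gostos xs).1 = xs.filter (fun f => pvMatch movies_map gostos f) := by
  induction xs with
  | nil => rfl
  | cons f fs ih =>
    simp only [pvPartition, List.filter_cons]
    by_cases h : pvMatch movies_map gostos f = true <;> simp [h, ih]

theorem pvPartition_snd (movies_map : List (String × String)) (gostos : List String) (xs : List String) :
    (pvPartition movies_map gostos xs).2 = xs.filter (fun f => !pvMatch movies_map gostos f) := by
  induction xs with
  | nil => rfl
  | cons f fs ih =>
    simp only [pvPartition, List.filter_cons]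
    by_cases h : pvMatch movies_map gostos f = true <;> simp [h, ih]

-- A's 'f not in compativeis' equals 'no genre match' for f drawn from recomendacoes
theorem filter_not_contains (movies_map : List (String × String)) (gostos : List String) (xs : List String) :
    xs.filter (fun f => !(xs.filter (fun g => pvMatch movies_map gostos g)).contains f)
      = xs.filter (fun f => !pvMatch movies_map gostos f) := by
  apply List.filter_congr
  intro f hf
  by_cases h : pvMatch movies_map gostos f = true
  · simp [List.mem_filter, hf, h]
  · simp [List.mem_filter, h]

-- ===== VERDICT (by name: the statement is the Claim_ definition above) =====
theorem reforcar_por_genero_spec : Claim_equal_reforcar_por_genero := by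
  intro recs gostos mm top_n _
  show reforcar_por_genero recs gostos mm top_n = reforcar_por_genero_alt recs gostos mm top_n
  unfold reforcar_por_genero reforcar_por_genero_alt
  simp only [pvPartition_fst, pvPartition_snd]
  set comp := recs.filter (fun f => pvMatch mm gostos f) with hcomp
  by_cases h3 : comp.length ≥ 3
  · simp [h3]
  · simp only [h3, if_false]
    by_cases hne : comp.isEmpty
    · have hnil : comp = [] := List.isEmpty_iff.mp hne
      have hall : recs.filter (fun f => !pvMatch mm gostos f) = recs := by
        apply List.filter_eq_self.mpr
        intro f hf
        have : f ∉ comp := by simp [hnil]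
        simp only [hcomp, List.mem_filter, hf, true_and] at this
        simpa using this
      simp [hnil, hall]
    · simp only [hne, Bool.not_false, if_true]
      rw [hcomp, filter_not_contains]
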